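-- pv_equiv track=rewrite | github.com/Eran42/unicaja-stats-hub | src/sources/eurobasket.py | _comp_matches
-- ===== SOURCE A (Python) =====
-- _COMP_ALIASES: dict[str, list[str]] = {
--     "Greek League":  ["greece", "greek", "gbl", "basket league", "esake"],
--     "LNB Pro A":     ["lnb", "pro a", "france", "betclic"],
--     "Primera FEB":   ["primera", "feb", "primera feb"],
--     "LEB Oro":       ["leb oro", "leb"],
-- }
--
-- def _comp_matches(cell_text: str, competition: str) -> bool:
--     """Return True if cell_text matches the competition name."""
--     text = cell_text.lower()
--     # Direct match
--     if competition.lower() in text: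
--         return True
--     # Alias match
--     for aliases in _COMP_ALIASES.values():
--         if competition.lower() in [a.lower() for a in aliases]:
--             if any(a.lower() in text for a in aliases):
--                 return True
--     return False
-- ===== SOURCE B (Python) =====
-- _COMP_ALIASES: dict[str, list[str]] = {
--     "Greek League":  ["greece", "greek", "gbl", "basket league", "esake"],
--     "LNB Pro A":     ["lnb", "pro a", "france", "betclic"],
--     "Primera FEB":   ["primera", "feb", "primera feb"],
--     "LEB Oro":       ["leb oro", "leb"],
-- }
--
-- # Reverse index built once: lowercased alias -> its whole (lowercased) alias group.
-- _ALIAS_INDEX: dict[str, list[str]] = {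
--     a.lower(): [x.lower() for x in group]
--     for group in _COMP_ALIASES.values()
--     for a in group
-- }
--
--
-- def _comp_matches(cell_text: str, competition: str) -> bool:
--     """Return True if cell_text matches the competition name."""
--     text = cell_text.lower()
--     comp = competition.lower()
--     if comp in text:
--         return True
--     group = _ALIAS_INDEX.get(comp)
--     if group is None:
--         return False
--     return any(a in text for a in group)
-- ===== Notes on version B (the rewrite author's own statement) =====
-- stated objective: idiomatic
-- what changed: Replaced the per-call scan over all alias groups (with exact-membership tests inside) by a one-shot keyed lookup into a reverse index dict, built once, mapping each lowercased alias to its lowercased group.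
import Mathlib
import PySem

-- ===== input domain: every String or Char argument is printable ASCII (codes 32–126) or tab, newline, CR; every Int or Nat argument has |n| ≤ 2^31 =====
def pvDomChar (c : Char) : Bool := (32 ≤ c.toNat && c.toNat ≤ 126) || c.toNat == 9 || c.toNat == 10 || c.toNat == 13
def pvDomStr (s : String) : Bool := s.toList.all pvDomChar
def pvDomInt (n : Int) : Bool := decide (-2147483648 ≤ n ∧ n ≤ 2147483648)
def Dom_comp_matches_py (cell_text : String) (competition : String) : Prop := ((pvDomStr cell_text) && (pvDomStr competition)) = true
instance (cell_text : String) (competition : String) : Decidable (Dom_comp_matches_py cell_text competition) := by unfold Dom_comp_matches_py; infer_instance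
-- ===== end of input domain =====

-- B replaces A's scan over all alias groups by a single lookup into a reverse index
-- (lowercased alias -> its lowercased group) built once from the table (objective: idiomatic).

-- ===== PORT A =====
-- _COMP_ALIASES.values(), in insertion order
def compGroups : List (List String) :=
  [["greece", "greek", "gbl", "basket league", "esake"],
   ["lnb", "pro a", "france", "betclic"],
   ["primera", "feb", "primera feb"],
   ["leb oro", "leb"]]

def comp_matches_py (cell_text : String) (competition : String) : Bool :=
  let text := PySem.Str.lower cell_text
  if PySem.Str.isIn (PySem.Str.lower competition) text then true
  else
    -- for aliases in _COMP_ALIASES.values(): if comp in [a.lower() …] and any(… in text): return True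
    compGroups.any (fun aliases =>
      (aliases.map PySem.Str.lower).contains (PySem.Str.lower competition) &&
      aliases.any (fun a => PySem.Str.isIn (PySem.Str.lower a) text))

-- ===== PORT B =====
-- the dict comprehension building _ALIAS_INDEX, as nested folds inserting in the same order
def aliasIndex : PySem.Dict String (List String) :=
  compGroups.foldl
    (fun d g => g.foldl (fun d a => d.insert (PySem.Str.lower a) (g.map PySem.Str.lower)) d)
    PySem.Dict.empty

def comp_matches_py_alt (cell_text : String) (competition : String) : Bool :=
  let text := PySem.Str.lower cell_text
  let comp := PySem.Str.lower competition
  if PySem.Str.isIn comp text then true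
  else
    match aliasIndex.get? comp with
    | none => false
    | some g => g.any (fun a => PySem.Str.isIn a text)

-- ===== PRECONDITION & SPEC =====
def Spec_comp_matches_py (cell_text : String) (competition : String) (out : Bool) : Prop := out = comp_matches_py_alt cell_text competition
instance (cell_text : String) (competition : String) (out : Bool) : Decidable (Spec_comp_matches_py cell_text competition out) := by unfold Spec_comp_matches_py; infer_instance

-- ===== CLAIM (what is proved, stated in full; the proofs are below) =====
def Claim_equal_comp_matches_py : Prop := ∀ (cell_text : String) (competition : String), Dom_comp_matches_py cell_text competition → Spec_comp_matches_py cell_text competition (comp_matches_py cell_text competition)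

-- ===== LEMMAS AND PROOFS =====

-- the reverse index, evaluated (every alias is already lowercase, keys are the 13 distinct aliases)
theorem aliasIndex_eval : aliasIndex = PySem.Dict.mk
    [("greece", ["greece", "greek", "gbl", "basket league", "esake"]),
     ("greek", ["greece", "greek", "gbl", "basket league", "esake"]),
     ("gbl", ["greece", "greek", "gbl", "basket league", "esake"]),
     ("basket league", ["greece", "greek", "gbl", "basket league", "esake"]),
     ("esake", ["greece", "greek", "gbl", "basket league", "esake"]),
     ("lnb", ["lnb", "pro a", "france", "betclic"]),
     ("pro a", ["lnb", "pro a", "france", "betclic"]),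
     ("france", ["lnb", "pro a", "france", "betclic"]),
     ("betclic", ["lnb", "pro a", "france", "betclic"]),
     ("primera", ["primera", "feb", "primera feb"]),
     ("feb", ["primera", "feb", "primera feb"]),
     ("primera feb", ["primera", "feb", "primera feb"]),
     ("leb oro", ["leb oro", "leb"]),
     ("leb", ["leb oro", "leb"])] := by decide

set_option maxHeartbeats 1000000 in
set_option maxRecDepth 8192 in
theorem ports_agree (cell_text competition : String) :
    comp_matches_py cell_text competition = comp_matches_py_alt cell_text competition := by
  unfold comp_matches_py comp_matches_py_alt
  rw [aliasIndex_eval]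
  simp only [compGroups, List.any_cons, List.any_nil, List.map_cons, List.map_nil,
    List.contains_cons, List.contains_nil, PySem.Dict.get?_mk_cons,
    show PySem.Str.lower "greece" = "greece" from rfl,
    show PySem.Str.lower "greek" = "greek" from rfl,
    show PySem.Str.lower "gbl" = "gbl" from rfl,
    show PySem.Str.lower "basket league" = "basket league" from rfl,
    show PySem.Str.lower "esake" = "esake" from rfl,
    show PySem.Str.lower "lnb" = "lnb" from rfl,
    show PySem.Str.lower "pro a" = "pro a" from rfl,
    show PySem.Str.lower "france" = "france" from rfl,
    show PySem.Str.lower "betclic" = "betclic" from rfl,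
    show PySem.Str.lower "primera" = "primera" from rfl,
    show PySem.Str.lower "feb" = "feb" from rfl,
    show PySem.Str.lower "primera feb" = "primera feb" from rfl,
    show PySem.Str.lower "leb oro" = "leb oro" from rfl,
    show PySem.Str.lower "leb" = "leb" from rfl,
    beq_iff_eq]
  generalize PySem.Str.lower cell_text = text
  generalize PySem.Str.lower competition = comp
  by_cases hd : PySem.Str.isIn comp text = true
  · rw [if_pos hd, if_pos hd]
  · rw [if_neg hd, if_neg hd]
    by_cases h1 : comp = "greece"
    · subst h1; simp
    ·
      by_cases h2 : comp = "greek"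
      · subst h2; simp
      ·
        by_cases h3 : comp = "gbl"
        · subst h3; simp
        ·
          by_cases h4 : comp = "basket league"
          · subst h4; simp
          ·
            by_cases h5 : comp = "esake"
            · subst h5; simp
            ·
              by_cases h6 : comp = "lnb"
              · subst h6; simp
              ·
                by_cases h7 : comp = "pro a"
                · subst h7; simp
                ·
                  by_cases h8 : comp = "france"
                  · subst h8; simp
                  ·
                    by_cases h9 : comp = "betclic"
                    · subst h9; simp
                    ·
                      by_cases h10 : comp = "primera"
                      · subst h10; simp
                      ·
                        by_cases h11 : comp = "feb"
                        · subst h11; simp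
                        ·
                          by_cases h12 : comp = "primera feb"
                          · subst h12; simp
                          ·
                            by_cases h13 : comp = "leb oro"
                            · subst h13; simp
                            ·
                              by_cases h14 : comp = "leb"
                              · subst h14; simp
                              ·
                                rw [if_neg (fun h => h1 h.symm), if_neg (fun h => h2 h.symm), if_neg (fun h => h3 h.symm), if_neg (fun h => h4 h.symm), if_neg (fun h => h5 h.symm), if_neg (fun h => h6 h.symm), if_neg (fun h => h7 h.symm), if_neg (fun h => h8 h.symm), if_neg (fun h => h9 h.symm), if_neg (fun h => h10 h.symm), if_neg (fun h => h11 h.symm), if_neg (fun h => h12 h.symm), if_neg (fun h => h13 h.symm), if_neg (fun h => h14 h.symm)]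
                                simp [show (comp == "greece") = false from beq_eq_false_iff_ne.mpr h1, show (comp == "greek") = false from beq_eq_false_iff_ne.mpr h2, show (comp == "gbl") = false from beq_eq_false_iff_ne.mpr h3, show (comp == "basket league") = false from beq_eq_false_iff_ne.mpr h4, show (comp == "esake") = false from beq_eq_false_iff_ne.mpr h5, show (comp == "lnb") = false from beq_eq_false_iff_ne.mpr h6, show (comp == "pro a") = false from beq_eq_false_iff_ne.mpr h7, show (comp == "france") = false from beq_eq_false_iff_ne.mpr h8, show (comp == "betclic") = false from beq_eq_false_iff_ne.mpr h9, show (comp == "primera") = false from beq_eq_false_iff_ne.mpr h10, show (comp == "feb") = false from beq_eq_false_iff_ne.mpr h11, show (comp == "primera feb") = false from beq_eq_false_iff_ne.mpr h12, show (comp == "leb oro") = false from beq_eq_false_iff_ne.mpr h13, show (comp == "leb") = false from beq_eq_false_iff_ne.mpr h14,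
                                  show PySem.Dict.get? (PySem.Dict.mk []) comp = none from rfl]

-- ===== VERDICT (by name: the statement is the Claim_ definition above) =====
theorem comp_matches_py_spec : Claim_equal_comp_matches_py := by
  intro cell_text competition _
  exact ports_agree cell_text competition
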